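-- pv_equiv track=rewrite | github.com/mmhassaninm/OmniAgentFactory | backend/shopify/agents/version_manager.py | _determine_bump
-- ===== SOURCE A (Python) =====
-- from typing import Any, Dict, List, Optional
--
-- VERSION_RULES = {
--     "major": ["complete redesign", "new architecture", "breaking change", "color scheme overhaul"],
--     "minor": ["new section", "new page", "new feature", "new template", "performance improvement", "new snippet"],
--     "patch": ["bug fix", "typo", "css tweak", "minor copy change", "accessibility fix", "small adjustment"],
-- }
--
-- def _determine_bump(changes: List[str]) -> str:
--     changes_lower = [c.lower() for c in changes]
--     for keyword in VERSION_RULES["major"]: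
--         if any(keyword in c for c in changes_lower):
--             return "major"
--     for keyword in VERSION_RULES["minor"]:
--         if any(keyword in c for c in changes_lower):
--             return "minor"
--     return "patch"
-- ===== SOURCE B (Python) =====
-- from typing import List
--
-- VERSION_RULES = {
--     "major": ["complete redesign", "new architecture", "breaking change", "color scheme overhaul"],
--     "minor": ["new section", "new page", "new feature", "new template", "performance improvement", "new snippet"],
--     "patch": ["bug fix", "typo", "css tweak", "minor copy change", "accessibility fix", "small adjustment"],
-- }
--
-- _RANKED = [("major", 2), ("minor", 1)]
--
-- def _determine_bump(changes: List[str]) -> str: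
--     best = 0
--     for change in changes:
--         c = change.lower()
--         rank = 0
--         for cat, r in _RANKED:
--             if any(k in c for k in VERSION_RULES[cat]):
--                 rank = r
--                 break
--         if rank > best:
--             best = rank
--     return "major" if best == 2 else ("minor" if best == 1 else "patch")
-- ===== Notes on version B (the rewrite author's own statement) =====
-- stated objective: alternative
-- what changed: B traverses the changes once, assigning each change a numeric rank (major=2, minor=1, else 0) and keeping a running maximum, then maps the maximum back to a category, instead of A's keyword-first scans over the whole (pre-lowered) change list with early return.
import Mathlib
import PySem

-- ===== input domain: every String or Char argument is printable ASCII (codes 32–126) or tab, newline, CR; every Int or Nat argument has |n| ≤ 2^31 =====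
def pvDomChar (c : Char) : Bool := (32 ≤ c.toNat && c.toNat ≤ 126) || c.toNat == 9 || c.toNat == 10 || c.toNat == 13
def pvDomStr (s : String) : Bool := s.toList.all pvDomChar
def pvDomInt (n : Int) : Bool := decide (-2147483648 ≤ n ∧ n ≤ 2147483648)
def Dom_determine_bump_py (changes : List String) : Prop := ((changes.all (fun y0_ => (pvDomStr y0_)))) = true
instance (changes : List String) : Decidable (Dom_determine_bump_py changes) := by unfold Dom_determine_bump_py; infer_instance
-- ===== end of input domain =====

-- B replaces A's keyword-first scans (with early return) by one changes-first pass keeping a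
-- running maximum rank (major=2, minor=1), mapped back to a category at the end; objective: alternative.

-- ===== PORT A =====
def pvMajorKws : List String :=
  ["complete redesign", "new architecture", "breaking change", "color scheme overhaul"]
def pvMinorKws : List String :=
  ["new section", "new page", "new feature", "new template", "performance improvement", "new snippet"]

-- `for keyword in VERSION_RULES[cat]: if any(keyword in c for c in changes_lower): return label`
def pvScanA (kws : List String) (cl : List String) (label : String) : Option String :=
  match kws with
  | [] => none
  | k :: rest =>
      if cl.any (fun c => PySem.Str.isIn k c) then some label else pvScanA rest cl label

def determine_bump_py (changes : List String) : String :=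
  let changes_lower := changes.map (fun c => PySem.Str.lower c)
  match pvScanA pvMajorKws changes_lower "major" with
  | some r => r
  | none =>
    match pvScanA pvMinorKws changes_lower "minor" with
    | some r => r
    | none => "patch"

-- ===== PORT B =====
-- Source B's _RANKED table: (keyword list of the category, its rank)
def pvRanked : List (List String × Nat) := [(pvMajorKws, 2), (pvMinorKws, 1)]

-- Source B's inner `for cat, r in _RANKED: if any(...): rank = r; break`
def pvRankLoop (pairs : List (List String × Nat)) (c : String) : Nat :=
  match pairs with
  | [] => 0
  | (kws, r) :: rest =>
      if kws.any (fun k => PySem.Str.isIn k c) then r else pvRankLoop rest c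

def determine_bump_py_alt (changes : List String) : String :=
  let best := changes.foldl (fun best change =>
    let c := PySem.Str.lower change
    let rank := pvRankLoop pvRanked c
    if rank > best then rank else best) 0
  if best = 2 then "major" else if best = 1 then "minor" else "patch"

-- ===== PRECONDITION & SPEC =====
def Spec_determine_bump_py (changes : List String) (out : String) : Prop := out = determine_bump_py_alt changes
instance (changes : List String) (out : String) : Decidable (Spec_determine_bump_py changes out) := by unfold Spec_determine_bump_py; infer_instance

-- ===== CLAIM (what is proved, stated in full; the proofs are below) =====
def Claim_equal_determine_bump_py : Prop := ∀ (changes : List String), Dom_determine_bump_py changes → Spec_determine_bump_py changes (determine_bump_py changes)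

-- ===== LEMMAS AND PROOFS =====

-- whether some keyword of `kws` occurs in the lowered change `c`
def pvHit (kws : List String) (c : String) : Bool :=
  kws.any (fun k => PySem.Str.isIn k (PySem.Str.lower c))

-- the rank Source B's inner loop assigns to one change
def pvRank (c : String) : Nat := pvRankLoop pvRanked (PySem.Str.lower c)

theorem pvScanA_eq (kws : List String) (cl : List String) (label : String) :
    pvScanA kws cl label =
      if kws.any (fun k => cl.any (fun c => PySem.Str.isIn k c)) then some label else none := by
  induction kws with
  | nil => simp [pvScanA]
  | cons k rest ih =>
      simp only [pvScanA, List.any_cons, ih]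
      by_cases h : (cl.any fun c => PySem.Str.isIn k c) = true
      · simp only [h]; simp
      · simp only [Bool.not_eq_true] at h; simp only [h]; simp

-- swap the two `any`s (A scans keywords first, B scans changes first)
theorem pvAny_swap (kws : List String) (changes : List String) :
    (kws.any (fun k => changes.any (fun c => PySem.Str.isIn k (PySem.Str.lower c))))
      = changes.any (fun c => pvHit kws c) := by
  rw [Bool.eq_iff_iff]
  simp only [pvHit, List.any_eq_true]
  constructor
  · rintro ⟨k, hk, c, hc, h⟩; exact ⟨c, hc, k, hk, h⟩
  · rintro ⟨c, hc, k, hk, h⟩; exact ⟨k, hk, c, hc, h⟩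

theorem pvRank_eq (c : String) :
    pvRank c = if pvHit pvMajorKws c then 2 else if pvHit pvMinorKws c then 1 else 0 := by
  simp [pvRank, pvRanked, pvRankLoop, pvHit]

-- B's fold step is a running maximum of the ranks
theorem pvStepFun_eq :
    (fun (best : Nat) (change : String) =>
        if pvRankLoop pvRanked (PySem.Str.lower change) > best
        then pvRankLoop pvRanked (PySem.Str.lower change) else best)
      = fun best change => max best (pvRank change) := by
  funext b c
  by_cases h : pvRankLoop pvRanked (PySem.Str.lower c) > b
  · rw [if_pos h]; simp [pvRank]; omega
  · rw [if_neg h]; simp [pvRank]; omega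

theorem pvMaxFold_shift (l : List String) : ∀ acc : Nat,
    l.foldl (fun best change => max best (pvRank change)) acc
      = max acc (l.foldl (fun best change => max best (pvRank change)) 0) := by
  induction l with
  | nil => intro acc; simp
  | cons a l ih =>
      intro acc
      simp only [List.foldl_cons, Nat.zero_max]
      rw [ih (max acc (pvRank a)), ih (pvRank a)]
      omega

-- the maximum rank over all changes, characterised by the two hit predicates
theorem pvMaxFold_char (l : List String) :
    l.foldl (fun best change => max best (pvRank change)) 0
      = if l.any (fun c => pvHit pvMajorKws c) then 2
        else if l.any (fun c => pvHit pvMinorKws c) then 1 else 0 := by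
  induction l with
  | nil => simp
  | cons a l ih =>
      simp only [List.foldl_cons, Nat.zero_max]
      rw [pvMaxFold_shift l, ih, pvRank_eq a]
      simp only [List.any_cons]
      by_cases h1 : pvHit pvMajorKws a = true <;>
        by_cases h2 : l.any (fun c => pvHit pvMajorKws c) = true <;>
        by_cases h3 : pvHit pvMinorKws a = true <;>
        by_cases h4 : l.any (fun c => pvHit pvMinorKws c) = true <;>
        simp [h1, h2, h3, h4]

-- ===== VERDICT (by name: the statement is the Claim_ definition above) =====
theorem determine_bump_py_spec : Claim_equal_determine_bump_py := by
  intro changes _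
  show determine_bump_py changes = determine_bump_py_alt changes
  unfold determine_bump_py determine_bump_py_alt
  rw [pvStepFun_eq]
  simp only [pvScanA_eq, List.any_map, Function.comp_def, pvAny_swap, pvMaxFold_char]
  by_cases h1 : changes.any (fun c => pvHit pvMajorKws c) = true <;>
    by_cases h2 : changes.any (fun c => pvHit pvMinorKws c) = true <;>
    simp [h1, h2]
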